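-- pv_equiv track=rewrite | github.com/nguyenchiemminhvu/DSA | Problems/Leetcode/LargestTimeForGivenDigits/solve.py | largestTimeFromDigits
-- ===== SOURCE A (Python) =====
-- from typing import List
-- from collections import Counter
--
-- def largestTimeFromDigits(arr: List[int]) -> str:
--     hours = [f"{val:02d}" for val in range(23, -1, -1)]
--     minutes = [f"{val:02d}" for val in range(59, -1, -1)]
--
--     f_arr = Counter(arr)
--     for h in hours:
--         for m in minutes:
--             tmp = [int(c) for c in h + m]
--             f_tmp = Counter(tmp)
--             if f_tmp == f_arr:
--                 return h + ":" + m
--     return ""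
-- ===== SOURCE B (Python) =====
-- def _selections(xs):
--     # each element paired with the list of the remaining ones, in order
--     if not xs:
--         return []
--     head, tail = xs[0], xs[1:]
--     return [(head, tail)] + [(x, [head] + rest) for (x, rest) in _selections(tail)]
--
-- def _perms(xs):
--     # all orderings of xs, by recursively choosing each element first
--     if not xs:
--         return [[]]
--     return [[x] + p for (x, rest) in _selections(xs) for p in _perms(rest)]
--
-- def largestTimeFromDigits(arr):
--     if len(arr) != 4 or any(d < 0 or d > 9 for d in arr):
--         return ""
--     best = -1
--     for a, b, c, d in _perms(arr):
--         h, m = a * 10 + b, c * 10 + d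
--         if h < 24 and m < 60:
--             t = h * 60 + m
--             if t > best:
--                 best = t
--     return "" if best < 0 else "%02d:%02d" % (best // 60, best % 60)
-- ===== Notes on version B (the rewrite author's own statement) =====
-- stated objective: faster
-- what changed: Replaces A's descending scan over all 1440 clock times (building and comparing a Counter per candidate) by recursive enumeration of the at most 24 permutations of the four digits, validating each numerically as HH:MM and keeping the largest minute count.
import Mathlib
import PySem

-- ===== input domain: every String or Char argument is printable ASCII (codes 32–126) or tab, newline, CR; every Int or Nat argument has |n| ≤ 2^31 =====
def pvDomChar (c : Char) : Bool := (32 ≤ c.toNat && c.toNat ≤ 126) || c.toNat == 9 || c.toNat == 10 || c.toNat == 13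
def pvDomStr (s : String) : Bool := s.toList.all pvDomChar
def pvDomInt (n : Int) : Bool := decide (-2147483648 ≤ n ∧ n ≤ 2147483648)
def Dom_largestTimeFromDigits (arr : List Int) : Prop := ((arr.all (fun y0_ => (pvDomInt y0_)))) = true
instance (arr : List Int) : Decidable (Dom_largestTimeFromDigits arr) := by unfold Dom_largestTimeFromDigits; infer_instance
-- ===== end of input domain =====

set_option maxRecDepth 100000
set_option maxHeartbeats 2000000


-- B replaces A's scan over all 1440 clock times (a Counter build and compare per candidate) by a
-- recursive enumeration of the ≤ 24 permutations of the four digits, validating each numerically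
-- as HH:MM and keeping the largest minute count (objective: faster by a constant factor).

-- ===== PORT A =====
-- f"{v:02d}" — exact for the non-negative v formatted here
def pvFmtA (v : Int) : String := PySem.Str.zfill (PySem.Int.toStr v) 2
-- int(c); every char parsed here is a decimal digit, where ofChars? = some (none is unreachable)
def pvIntChar (c : Char) : Int := (PySem.Int.ofChars? [c]).getD 0
-- Python's f_tmp == f_arr on Counters: mapping equality (same key set, same counts)
def pvCounterEq (d1 d2 : PySem.Dict Int Int) : Bool :=
  PySem.Set.equal d1.keys d2.keys && d1.keys.all (fun k => d1.getD k 0 == d2.getD k 0)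

def largestTimeFromDigits (arr : List Int) : String :=
  let hours := (PySem.List.pyRange 23 (-1) (-1)).map pvFmtA
  let minutes := (PySem.List.pyRange 59 (-1) (-1)).map pvFmtA
  let fArr := PySem.Dict.counter arr
  match hours.findSome? (fun h => minutes.findSome? (fun m =>
      let tmp := (h ++ m).toList.map pvIntChar
      let fTmp := PySem.Dict.counter tmp
      if pvCounterEq fTmp fArr then some (h ++ ":" ++ m) else none)) with
  | some s => s
  | none => ""

-- ===== PORT B =====
-- "%02d:%02d" % (h, m) — exact for the non-negative h, m formatted here
def pvFmtB (h m : Int) : String :=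
  PySem.Str.zfill (PySem.Int.toStr h) 2 ++ ":" ++ PySem.Str.zfill (PySem.Int.toStr m) 2

-- _selections(xs): each element paired with the list of the remaining ones, in order
def pvSelections : List Int → List (Int × List Int)
  | [] => []
  | h :: t => (h, t) :: (pvSelections t).map (fun s => (s.1, h :: s.2))

-- cited by pvPerms' decreasing_by
theorem pvSel_len (xs : List Int) (s : Int × List Int) (hs : s ∈ pvSelections xs) :
    s.2.length + 1 = xs.length := by
  induction xs generalizing s with
  | nil => simp [pvSelections] at hs
  | cons h t ih =>
      simp only [pvSelections, List.mem_cons, List.mem_map] at hs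
      rcases hs with rfl | ⟨s', hs', rfl⟩
      · rfl
      · have := ih s' hs'
        simp only [List.length_cons]
        omega

-- _perms(xs): all orderings of xs, by recursively choosing each element first
def pvPerms (xs : List Int) : List (List Int) :=
  match xs with
  | [] => [[]]
  | x :: t =>
      (pvSelections (x :: t)).attach.flatMap (fun s => (pvPerms s.1.2).map (fun p => s.1.1 :: p))
termination_by xs.length
decreasing_by
  have := pvSel_len _ _ s.2
  simp only [List.length_cons] at *
  omega

-- the loop body over one permutation; the `_ => best` arm is unreachable under the length-4 guard
def pvStep (best : Int) (p : List Int) : Int :=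
  match p with
  | [a, b, c, d] =>
      if a * 10 + b < 24 ∧ c * 10 + d < 60 then
        (if (a * 10 + b) * 60 + (c * 10 + d) > best then (a * 10 + b) * 60 + (c * 10 + d) else best)
      else best
  | _ => best

def largestTimeFromDigits_alt (arr : List Int) : String :=
  if arr.length ≠ 4 ∨ arr.any (fun d => decide (d < 0) || decide (d > 9)) = true then ""
  else
    let best := (pvPerms arr).foldl pvStep (-1)
    if best < 0 then "" else pvFmtB (PySem.Int.floordiv best 60) (PySem.Int.mod best 60)

-- ===== PRECONDITION & SPEC =====
def Spec_largestTimeFromDigits (arr : List Int) (out : String) : Prop := out = largestTimeFromDigits_alt arr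
instance (arr : List Int) (out : String) : Decidable (Spec_largestTimeFromDigits arr out) := by unfold Spec_largestTimeFromDigits; infer_instance

-- ===== CLAIM (what is proved, stated in full; the proofs are below) =====
def Claim_equal_largestTimeFromDigits : Prop := ∀ (arr : List Int), Dom_largestTimeFromDigits arr → Spec_largestTimeFromDigits arr (largestTimeFromDigits arr)

-- ===== LEMMAS AND PROOFS =====

-- the four digits of the clock time t, as A's loop reads them off
def pvDigits (t : Int) : List Int :=
  [PySem.Int.floordiv (PySem.Int.floordiv t 60) 10, PySem.Int.mod (PySem.Int.floordiv t 60) 10,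
   PySem.Int.floordiv (PySem.Int.mod t 60) 10, PySem.Int.mod (PySem.Int.mod t 60) 10]

-- A's inner loop body in flattened (single minute-count) form
def pvGB (target : List Int) (t : Int) : Option String :=
  if PySem.List.sorted (pvDigits t) (fun x => x) false == target
  then some (pvFmtB (PySem.Int.floordiv t 60) (PySem.Int.mod t 60)) else none

def pvGood : List Int → Bool
  | [a, b, c, d] => decide (a * 10 + b < 24 ∧ c * 10 + d < 60)
  | _ => false

def pvTval : List Int → Int
  | [a, b, c, d] => (a * 10 + b) * 60 + (c * 10 + d)
  | _ => -1

theorem pv_fs_congr {α β : Type} (l : List α) (f g : α → Option β)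
    (h : ∀ x ∈ l, f x = g x) : l.findSome? f = l.findSome? g := by
  induction l with
  | nil => rfl
  | cons a l ih =>
      simp only [List.findSome?_cons, h a (List.mem_cons_self), ih fun x hx => h x (List.mem_cons_of_mem a hx)]

theorem pv_fs_flatMap {α β γ δ : Type} (l1 : List α) (l2 : List β) (g : α → β → γ) (F : γ → Option δ) :
    (l1.flatMap fun a => l2.map (g a)).findSome? F
      = l1.findSome? (fun a => l2.findSome? (fun b => F (g a b))) := by
  induction l1 with
  | nil => rfl
  | cons a l ih =>
      rw [List.flatMap_cons, List.findSome?_append, List.findSome?_map, ih, List.findSome?_cons]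
      have hc : (F ∘ g a) = fun b => F (g a b) := rfl
      rw [hc]
      cases l2.findSome? fun b => F (g a b) <;> rfl

theorem pv_counterEq_iff (u v : List Int) :
    pvCounterEq (PySem.Dict.counter u) (PySem.Dict.counter v) = true ↔ ∀ k, u.count k = v.count k := by
  unfold pvCounterEq
  simp only [Bool.and_eq_true, PySem.Set.equal_iff, PySem.Dict.keys_counter, PySem.Set.mem_ofList,
    List.all_eq_true, PySem.Dict.getD_counter, beq_iff_eq, Nat.cast_inj]
  constructor
  · rintro ⟨hk, hc⟩ k
    by_cases hku : k ∈ u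
    · exact hc k hku
    · have hkv : k ∉ v := fun hv => hku ((hk k).mpr hv)
      rw [List.count_eq_zero.mpr hku, List.count_eq_zero.mpr hkv]
  · intro h
    refine ⟨fun x => ?_, fun k _ => h k⟩
    constructor <;> intro hx
    · have := h x; rw [← List.count_pos_iff] at hx ⊢; omega
    · have := h x; rw [← List.count_pos_iff] at hx ⊢; omega

theorem pv_condEq (u v : List Int) :
    pvCounterEq (PySem.Dict.counter u) (PySem.Dict.counter v)
      = (PySem.List.sorted u (fun x => x) false == PySem.List.sorted v (fun x => x) false) := by
  rw [Bool.eq_iff_iff, pv_counterEq_iff, beq_iff_eq, PySem.List.sorted_id_eq_sorted_id_iff_perm]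
  exact (List.perm_iff_count).symm

-- the hour/minute grid flattened to the descending minute-count range (concrete integer lists)
theorem pv_range_split :
    PySem.List.pyRange 1439 (-1) (-1)
      = (PySem.List.pyRange 23 (-1) (-1)).flatMap
          (fun h => (PySem.List.pyRange 59 (-1) (-1)).map (fun m => h * 60 + m)) := by decide

-- digits parsed back from the formatted strings, and bounds (concrete facts over 24 resp. 60 values)
theorem pv_hours_fact :
    ((PySem.List.pyRange 23 (-1) (-1)).all (fun h =>
      ((pvFmtA h).toList.map pvIntChar == [PySem.Int.floordiv h 10, PySem.Int.mod h 10])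
        && decide (0 ≤ h ∧ h ≤ 23))) = true := by decide

theorem pv_mins_fact :
    ((PySem.List.pyRange 59 (-1) (-1)).all (fun m =>
      ((pvFmtA m).toList.map pvIntChar == [PySem.Int.floordiv m 10, PySem.Int.mod m 10])
        && decide (0 ≤ m ∧ m ≤ 59))) = true := by decide

theorem pv_divmod_split (h m : Int) (hm : 0 ≤ m ∧ m ≤ 59) :
    PySem.Int.floordiv (h * 60 + m) 60 = h ∧ PySem.Int.mod (h * 60 + m) 60 = m := by
  rw [PySem.Int.floordiv_eq_ediv_of_pos (by omega), PySem.Int.mod_eq_emod_of_pos (by omega)]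
  omega

-- pointwise: A's loop body at the formatted pair (h, m) is the flattened body at t = h*60+m
theorem pv_body_eq (arr : List Int) (h m : Int)
    (hh : h ∈ PySem.List.pyRange 23 (-1) (-1)) (hm : m ∈ PySem.List.pyRange 59 (-1) (-1)) :
    (if pvCounterEq (PySem.Dict.counter (((pvFmtA h) ++ (pvFmtA m)).toList.map pvIntChar)) (PySem.Dict.counter arr)
     then some ((pvFmtA h) ++ ":" ++ (pvFmtA m)) else none)
      = pvGB (PySem.List.sorted arr (fun x => x) false) (h * 60 + m) := by
  have Hh := List.all_eq_true.mp pv_hours_fact h hh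
  have Hm := List.all_eq_true.mp pv_mins_fact m hm
  simp only [Bool.and_eq_true, beq_iff_eq, decide_eq_true_eq] at Hh Hm
  obtain ⟨hsplit1, hsplit2⟩ := pv_divmod_split h m ⟨Hm.2.1, Hm.2.2⟩
  unfold pvGB pvDigits
  rw [hsplit1, hsplit2]
  have hdig : ((pvFmtA h) ++ (pvFmtA m)).toList.map pvIntChar
      = [PySem.Int.floordiv h 10, PySem.Int.mod h 10, PySem.Int.floordiv m 10, PySem.Int.mod m 10] := by
    rw [String.toList_append, List.map_append, Hh.1, Hm.1]; rfl
  rw [hdig, pv_condEq]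
  rfl

-- A equals its flattened single-loop form
theorem pv_A_flat (arr : List Int) :
    largestTimeFromDigits arr
      = match (PySem.List.pyRange 1439 (-1) (-1)).findSome? (pvGB (PySem.List.sorted arr (fun x => x) false)) with
        | some s => s
        | none => "" := by
  have hA : largestTimeFromDigits arr
      = match ((PySem.List.pyRange 23 (-1) (-1)).map pvFmtA).findSome? (fun h =>
            ((PySem.List.pyRange 59 (-1) (-1)).map pvFmtA).findSome? (fun m =>
              if pvCounterEq (PySem.Dict.counter ((h ++ m).toList.map pvIntChar)) (PySem.Dict.counter arr)
              then some (h ++ ":" ++ m) else none)) with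
        | some s => s
        | none => "" := rfl
  rw [hA, pv_range_split, pv_fs_flatMap, List.findSome?_map]
  have hcongr : ((PySem.List.pyRange 23 (-1) (-1)).findSome? ((fun h =>
          ((PySem.List.pyRange 59 (-1) (-1)).map pvFmtA).findSome? (fun m =>
            if pvCounterEq (PySem.Dict.counter ((h ++ m).toList.map pvIntChar)) (PySem.Dict.counter arr)
            then some (h ++ ":" ++ m) else none)) ∘ pvFmtA))
      = ((PySem.List.pyRange 23 (-1) (-1)).findSome? (fun h =>
          (PySem.List.pyRange 59 (-1) (-1)).findSome? (fun m =>
            pvGB (PySem.List.sorted arr (fun x => x) false) (h * 60 + m)))) := by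
    apply pv_fs_congr
    intro h hh
    simp only [Function.comp, List.findSome?_map]
    apply pv_fs_congr
    intro m hm
    simp only [Function.comp_apply]
    exact pv_body_eq arr h m hh hm
  rw [hcongr]

-- the descending minute-count range, concretely
theorem pv_range_repr :
    PySem.List.pyRange 1439 (-1) (-1) = (List.range 1440).map (fun n : Nat => (1439 : Int) - (n : Int)) := by decide

theorem pv_mem_range (t : Int) :
    t ∈ PySem.List.pyRange 1439 (-1) (-1) ↔ 0 ≤ t ∧ t ≤ 1439 := by
  rw [pv_range_repr]
  constructor
  · intro ht
    obtain ⟨n, hn, rfl⟩ := List.mem_map.mp ht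
    have := List.mem_range.mp hn
    omega
  · intro ht
    exact List.mem_map.mpr ⟨(1439 - t).toNat, List.mem_range.mpr (by omega), by omega⟩

theorem pv_range_pairwise : (PySem.List.pyRange 1439 (-1) (-1)).Pairwise (· > ·) := by
  rw [pv_range_repr]
  exact List.pairwise_lt_range.map _ (fun a b hab => by omega)

theorem pv_digits_eq (t : Int) :
    pvDigits t = [t / 60 / 10, t / 60 % 10, t % 60 / 10, t % 60 % 10] := by
  unfold pvDigits
  rw [PySem.Int.floordiv_eq_ediv_of_pos (show (0:Int) < 60 by norm_num),
      PySem.Int.mod_eq_emod_of_pos (show (0:Int) < 60 by norm_num),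
      PySem.Int.floordiv_eq_ediv_of_pos (show (0:Int) < 10 by norm_num),
      PySem.Int.mod_eq_emod_of_pos (show (0:Int) < 10 by norm_num),
      PySem.Int.floordiv_eq_ediv_of_pos (show (0:Int) < 10 by norm_num),
      PySem.Int.mod_eq_emod_of_pos (show (0:Int) < 10 by norm_num)]

-- ----- permutation enumeration: soundness and completeness -----

theorem pvSel_perm (xs : List Int) (s : Int × List Int) (hs : s ∈ pvSelections xs) :
    (s.1 :: s.2).Perm xs := by
  induction xs generalizing s with
  | nil => simp [pvSelections] at hs
  | cons h t ih =>
      simp only [pvSelections, List.mem_cons, List.mem_map] at hs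
      rcases hs with rfl | ⟨s', hs', rfl⟩
      · exact List.Perm.refl _
      · exact (List.Perm.swap h s'.1 s'.2).trans ((ih s' hs').cons h)

theorem pvSel_complete (x : Int) (rest xs : List Int) (hp : (x :: rest).Perm xs) :
    ∃ rest', (x, rest') ∈ pvSelections xs ∧ rest.Perm rest' := by
  induction xs generalizing x rest with
  | nil => exact absurd hp.length_eq (by simp)
  | cons h t ih =>
      by_cases hx : x = h
      · subst hx
        exact ⟨t, by simp [pvSelections], hp.cons_inv⟩
      · have hhx : h ∈ rest := by
          have hmm : h ∈ x :: rest := hp.symm.subset (List.mem_cons_self)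
          rcases List.mem_cons.mp hmm with heq | hmem
          · exact absurd heq.symm hx
          · exact hmem
        have hper : (x :: rest.erase h).Perm t := by
          have herase := hp.erase h
          rwa [List.erase_cons_tail (by simpa using hx), List.erase_cons_head] at herase
        obtain ⟨rest'', hmem'', hperm''⟩ := ih x (rest.erase h) hper
        refine ⟨h :: rest'', ?_, ?_⟩
        · simp only [pvSelections, List.mem_cons, List.mem_map]
          exact Or.inr ⟨(x, rest''), hmem'', rfl⟩
        · exact (List.perm_cons_erase hhx).trans (hperm''.cons h)

theorem pv_mem_perms_aux (n : Nat) : ∀ (xs : List Int), xs.length = n →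
    ∀ (p : List Int), (p ∈ pvPerms xs ↔ p.Perm xs) := by
  induction n using Nat.strong_induction_on with
  | _ n ih =>
      intro xs hlen p
      match xs with
      | [] =>
          rw [pvPerms.eq_def]
          simp
      | h :: t =>
          rw [show pvPerms (h :: t)
                = (pvSelections (h :: t)).attach.flatMap
                    (fun s => (pvPerms s.1.2).map (fun p => s.1.1 :: p)) by rw [pvPerms.eq_def]]
          simp only [List.mem_flatMap, List.mem_attach, List.mem_map, true_and]
          constructor
          · rintro ⟨⟨s, hs⟩, q, hq, rfl⟩
            have hl := pvSel_len _ _ hs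
            have hq' : q.Perm s.2 := by
              simp only [List.length_cons] at hl hlen
              exact (ih s.2.length (by omega) s.2 rfl q).mp hq
            exact (hq'.cons s.1).trans (pvSel_perm _ _ hs)
          · intro hp
            match p with
            | [] => exact absurd hp.length_eq (by simp)
            | x :: rest =>
                obtain ⟨rest', hmem, hperm⟩ := pvSel_complete x rest (h :: t) hp
                have hl := pvSel_len _ _ hmem
                refine ⟨⟨(x, rest'), hmem⟩, rest, ?_, rfl⟩
                simp only [List.length_cons] at hl hlen
                exact (ih rest'.length (by omega) rest' rfl rest).mpr hperm

theorem pv_mem_perms (xs p : List Int) : p ∈ pvPerms xs ↔ p.Perm xs :=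
  pv_mem_perms_aux xs.length xs rfl p

-- ----- the fold over permutations computes the maximal valid minute count -----

theorem pvStep_eq (best : Int) (p : List Int) :
    pvStep best p = if pvGood p = true ∧ pvTval p > best then pvTval p else best := by
  rcases p with _ | ⟨a, _ | ⟨b, _ | ⟨c, _ | ⟨d, _ | ⟨e, rest⟩⟩⟩⟩⟩ <;>
    simp only [pvStep, pvGood, pvTval, decide_eq_true_eq, Bool.false_eq_true, false_and,
      if_false]
  split_ifs with h1 h2 <;> first | rfl | omega

theorem pv_fold_ge (l : List (List Int)) (seed : Int) : seed ≤ l.foldl pvStep seed := by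
  induction l generalizing seed with
  | nil => exact le_refl _
  | cons p l ih =>
      refine le_trans ?_ (ih (pvStep seed p))
      rw [pvStep_eq]
      split_ifs with h
      · omega
      · exact le_refl _

theorem pv_fold_cases (l : List (List Int)) (seed : Int) :
    l.foldl pvStep seed = seed
      ∨ ∃ p ∈ l, pvGood p = true ∧ l.foldl pvStep seed = pvTval p := by
  induction l generalizing seed with
  | nil => exact Or.inl rfl
  | cons p l ih =>
      rcases ih (pvStep seed p) with hcase | ⟨q, hq, hg, hv⟩
      · rw [List.foldl_cons, hcase, pvStep_eq]
        split_ifs with h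
        · exact Or.inr ⟨p, List.mem_cons_self, h.1, rfl⟩
        · exact Or.inl rfl
      · exact Or.inr ⟨q, List.mem_cons_of_mem p hq, hg, by rw [List.foldl_cons]; exact hv⟩

theorem pv_fold_ub (l : List (List Int)) (seed : Int) (p : List Int)
    (hp : p ∈ l) (hg : pvGood p = true) : pvTval p ≤ l.foldl pvStep seed := by
  induction l generalizing seed with
  | nil => simp at hp
  | cons q l ih =>
      rw [List.foldl_cons]
      rcases List.mem_cons.mp hp with rfl | hp
      · refine le_trans ?_ (pv_fold_ge l (pvStep seed p))
        rw [pvStep_eq]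
        split_ifs with h
        · exact le_refl _
        · have ht : ¬ pvTval p > seed := fun hgt => h ⟨hg, hgt⟩
          omega
      · exact ih (pvStep seed q) hp

-- findSome? over an if-body is the head of the filtered list, rendered
theorem pv_fs_filter (l : List Int) (target : List Int) :
    l.findSome? (pvGB target)
      = ((l.filter (fun t => PySem.List.sorted (pvDigits t) (fun x => x) false == target)).head?).map
          (fun t => pvFmtB (PySem.Int.floordiv t 60) (PySem.Int.mod t 60)) := by
  induction l with
  | nil => rfl
  | cons a l ih =>
      by_cases h : (PySem.List.sorted (pvDigits a) (fun x => x) false == target) = true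
      · have hgb : pvGB target a
            = some (pvFmtB (PySem.Int.floordiv a 60) (PySem.Int.mod a 60)) := by
          rw [pvGB, if_pos h]
        simp [hgb, h]
      · have hgb : pvGB target a = none := by rw [pvGB, if_neg h]
        simp [hgb, h, ih]

-- when any 1440-scan candidate matches, arr must be four digits 0..9
theorem pv_match_digits (t : Int) (ht : t ∈ PySem.List.pyRange 1439 (-1) (-1))
    (arr : List Int)
    (hcond : (PySem.List.sorted (pvDigits t) (fun x => x) false
        == PySem.List.sorted arr (fun x => x) false) = true) :
    arr.length = 4 ∧ ∀ d ∈ arr, 0 ≤ d ∧ d ≤ 9 := by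
  have hrange := (pv_mem_range t).mp ht
  have hperm : (pvDigits t).Perm arr := by
    rw [← PySem.List.sorted_id_eq_sorted_id_iff_perm]
    exact beq_iff_eq.mp hcond
  refine ⟨by simpa [pvDigits] using hperm.length_eq.symm, ?_⟩
  intro d hd
  have hdm : d ∈ pvDigits t := hperm.mem_iff.mpr hd
  rw [pv_digits_eq] at hdm
  simp only [List.mem_cons, List.not_mem_nil, or_false] at hdm
  rcases hdm with rfl | rfl | rfl | rfl <;> omega

-- ===== VERDICT (by name: the statement is the Claim_ definition above) =====
theorem largestTimeFromDigits_spec : Claim_equal_largestTimeFromDigits := by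
  unfold Claim_equal_largestTimeFromDigits
  intro arr _
  unfold Spec_largestTimeFromDigits
  rw [pv_A_flat arr, pv_fs_filter]
  by_cases hg : (arr.length ≠ 4 ∨ arr.any (fun d => decide (d < 0) || decide (d > 9)) = true)
  · -- B's digit guard trips: no scan candidate can match, so A's filter is empty too
    have hfe : (PySem.List.pyRange 1439 (-1) (-1)).filter
        (fun t => PySem.List.sorted (pvDigits t) (fun x => x) false
          == PySem.List.sorted arr (fun x => x) false) = [] := by
      rw [List.filter_eq_nil_iff]
      intro t ht hcond
      obtain ⟨hlen, hbnd⟩ := pv_match_digits t ht arr hcond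
      rcases hg with h | h
      · exact h hlen
      · rw [List.any_eq_true] at h
        obtain ⟨d, hd, hdp⟩ := h
        have := hbnd d hd
        simp only [Bool.or_eq_true, decide_eq_true_eq] at hdp
        omega
    rw [hfe, largestTimeFromDigits_alt, if_pos hg]
    rfl
  · -- guard passes: arr is four digits 0..9
    have hlen : arr.length = 4 := by
      by_contra h; exact hg (Or.inl h)
    have hbnd : ∀ d ∈ arr, 0 ≤ d ∧ d ≤ 9 := by
      intro d hd
      by_contra h
      exact hg (Or.inr (List.any_eq_true.mpr ⟨d, hd, by
        simp only [Bool.or_eq_true, decide_eq_true_eq]; omega⟩))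
    rw [largestTimeFromDigits_alt, if_neg hg]
    show _ = (if (pvPerms arr).foldl pvStep (-1) < 0 then ""
        else pvFmtB (PySem.Int.floordiv ((pvPerms arr).foldl pvStep (-1)) 60)
          (PySem.Int.mod ((pvPerms arr).foldl pvStep (-1)) 60))
    -- the two candidate sets coincide
    have hAtoB : ∀ t ∈ (PySem.List.pyRange 1439 (-1) (-1)).filter
        (fun t => PySem.List.sorted (pvDigits t) (fun x => x) false
          == PySem.List.sorted arr (fun x => x) false),
        ∃ p ∈ pvPerms arr, pvGood p = true ∧ pvTval p = t := by
      intro t ht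
      obtain ⟨htr, hcond⟩ := List.mem_filter.mp ht
      have hrange := (pv_mem_range t).mp htr
      have hperm : (pvDigits t).Perm arr := by
        rw [← PySem.List.sorted_id_eq_sorted_id_iff_perm]
        exact beq_iff_eq.mp hcond
      refine ⟨pvDigits t, (pv_mem_perms arr (pvDigits t)).mpr hperm, ?_, ?_⟩
      · rw [pv_digits_eq]
        simp only [pvGood, decide_eq_true_eq]
        omega
      · rw [pv_digits_eq]
        simp only [pvTval]
        omega
    have hBtoA : ∀ p ∈ pvPerms arr, pvGood p = true →
        pvTval p ∈ (PySem.List.pyRange 1439 (-1) (-1)).filter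
          (fun t => PySem.List.sorted (pvDigits t) (fun x => x) false
            == PySem.List.sorted arr (fun x => x) false) := by
      intro p hp hgp
      have hperm : p.Perm arr := (pv_mem_perms arr p).mp hp
      have hplen : p.length = 4 := by rw [hperm.length_eq, hlen]
      obtain ⟨a, b, c, d, rfl⟩ : ∃ a b c d, p = [a, b, c, d] := by
        rcases p with _ | ⟨a, _ | ⟨b, _ | ⟨c, _ | ⟨d, _ | ⟨e, rest⟩⟩⟩⟩⟩ <;>
          simp only [List.length_nil, List.length_cons] at hplen <;>
          first | exact ⟨_, _, _, _, rfl⟩ | omega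
      have hmem : ∀ x ∈ ([a, b, c, d] : List Int), 0 ≤ x ∧ x ≤ 9 :=
        fun x hx => hbnd x (hperm.subset hx)
      have ha := hmem a (by simp)
      have hb := hmem b (by simp)
      have hc := hmem c (by simp)
      have hd := hmem d (by simp)
      simp only [pvGood, decide_eq_true_eq] at hgp
      have hdig : pvDigits (pvTval [a, b, c, d]) = [a, b, c, d] := by
        rw [pv_digits_eq]
        simp only [pvTval, List.cons.injEq, and_true]
        refine ⟨by omega, by omega, by omega, by omega⟩
      rw [List.mem_filter]
      refine ⟨(pv_mem_range _).mpr ⟨by simp only [pvTval]; omega, by simp only [pvTval]; omega⟩, ?_⟩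
      rw [hdig, beq_iff_eq, PySem.List.sorted_id_eq_sorted_id_iff_perm]
      exact hperm
    rcases hF : (PySem.List.pyRange 1439 (-1) (-1)).filter
        (fun t => PySem.List.sorted (pvDigits t) (fun x => x) false
          == PySem.List.sorted arr (fun x => x) false) with _ | ⟨t0, rest⟩
    · -- no matching time: every permutation fails the check, best stays -1
      have hb : (pvPerms arr).foldl pvStep (-1) = -1 := by
        rcases pv_fold_cases (pvPerms arr) (-1) with h | ⟨p, hp, hgp, hv⟩
        · exact h
        · have := hBtoA p hp hgp
          rw [hF] at this
          simp at this
      rw [hb]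
      rfl
    · -- the head of the descending filtered list is exactly the fold's maximum
      have ht0F : t0 ∈ (PySem.List.pyRange 1439 (-1) (-1)).filter
          (fun t => PySem.List.sorted (pvDigits t) (fun x => x) false
            == PySem.List.sorted arr (fun x => x) false) := by
        rw [hF]; exact List.mem_cons_self
      have hmax : ∀ t ∈ (PySem.List.pyRange 1439 (-1) (-1)).filter
          (fun t => PySem.List.sorted (pvDigits t) (fun x => x) false
            == PySem.List.sorted arr (fun x => x) false), t ≤ t0 := by
        have hpw := (pv_range_pairwise.filter
          (fun t => PySem.List.sorted (pvDigits t) (fun x => x) false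
            == PySem.List.sorted arr (fun x => x) false))
        rw [hF, List.pairwise_cons] at hpw
        intro t ht
        rw [hF] at ht
        rcases List.mem_cons.mp ht with rfl | ht
        · exact le_refl _
        · exact le_of_lt (hpw.1 t ht)
      obtain ⟨p0, hp0, hg0, ht0⟩ := hAtoB t0 ht0F
      have h1 : t0 ≤ (pvPerms arr).foldl pvStep (-1) := by
        rw [← ht0]; exact pv_fold_ub (pvPerms arr) (-1) p0 hp0 hg0
      have ht0r : 0 ≤ t0 := ((pv_mem_range t0).mp (List.mem_filter.mp ht0F).1).1
      rcases pv_fold_cases (pvPerms arr) (-1) with hc | ⟨p, hp, hgp, hv⟩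
      · omega
      · have hmem := hBtoA p hp hgp
        rw [← hv] at hmem
        have h2 : (pvPerms arr).foldl pvStep (-1) ≤ t0 := hmax _ hmem
        have hbt : (pvPerms arr).foldl pvStep (-1) = t0 := le_antisymm h2 h1
        rw [hbt, if_neg (by omega : ¬ t0 < 0)]
        rfl
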